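-- pv_equiv track=rewrite | github.com/sahilborse/sursangam | musicModel/app.py | filter_notes
-- ===== SOURCE A (Python) =====
-- def filter_notes(notes, min_repeats=5):
--     """Filter notes array by counting notes that appear at least min_repeats times consecutively."""
--     filtered_notes = []
--     current_note = None
--     count = 0
--
--     for note in notes:
--         if note == current_note:
--             count += 1
--         else:
--             if count >= min_repeats:
--                 filtered_notes.append(current_note)
--             current_note = note
--             count = 1
--
--     if count >= min_repeats:
--         filtered_notes.append(current_note)
--
--     return filtered_notes
-- ===== SOURCE B (Python) =====
-- def filter_notes(notes, min_repeats=5):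
--     """Filter notes array by counting notes that appear at least min_repeats times consecutively."""
--     n = len(notes)
--     starts = [i for i in range(n) if i == 0 or notes[i] != notes[i - 1]]
--     ends = starts[1:] + [n]
--     return [notes[a] for a, b in zip(starts, ends) if b - a >= min_repeats]
-- ===== Notes on version B (the rewrite author's own statement) =====
-- stated objective: alternative
-- what changed: Replaces A's running current_note/count state machine with a trailing flush by staged comprehensions: first compute the list of run-start indices, pair each start with the next start (or len(notes)) via zip, then select the note at each start whose run span reaches min_repeats.
-- outside the precondition, e.g. on filter_notes(['a'], 0): A returns [None, 'a'], B returns ['a']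
import Mathlib
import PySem

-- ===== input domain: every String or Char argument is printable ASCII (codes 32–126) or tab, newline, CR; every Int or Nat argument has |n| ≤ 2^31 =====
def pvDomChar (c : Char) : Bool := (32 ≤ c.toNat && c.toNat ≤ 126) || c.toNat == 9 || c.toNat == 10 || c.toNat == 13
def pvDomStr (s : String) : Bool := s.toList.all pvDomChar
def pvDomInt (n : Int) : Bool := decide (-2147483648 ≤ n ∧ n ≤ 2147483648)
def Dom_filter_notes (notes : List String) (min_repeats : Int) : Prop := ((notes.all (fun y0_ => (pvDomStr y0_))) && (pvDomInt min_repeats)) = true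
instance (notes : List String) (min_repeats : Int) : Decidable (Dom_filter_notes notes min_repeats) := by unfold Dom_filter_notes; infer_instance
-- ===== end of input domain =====

-- B replaces A's current_note/count state machine (with trailing flush) by staged
-- comprehensions: first the list of run-start indices, then each start zipped with the
-- next start (or len(notes)), then the note at each start whose span is long enough.
-- Equivalence is claimed for min_repeats ≥ 1 (Pre_); for min_repeats ≤ 0 Python A puts
-- None (not a string) into its result, so A's output leaves the declared type there.

-- ===== PORT A =====
-- loop body of A: state = (filtered_notes, current_note, count)
def pvStepA (m : Int) (s : List String × Option String × Int) (note : String) :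
    List String × Option String × Int :=
  if some note == s.2.1 then (s.1, s.2.1, s.2.2 + 1)
  else ((if s.2.2 ≥ m then s.1 ++ s.2.1.toList else s.1), some note, 1)
  -- Python appends current_note even when it is None (only reachable for m ≤ 0, outside
  -- Pre_); Option.toList is exact whenever count ≥ 1, i.e. whenever current_note is set.

def filter_notes (notes : List String) (min_repeats : Int) : List String :=
  let s := notes.foldl (pvStepA min_repeats) ([], none, 0)
  if s.2.2 ≥ min_repeats then s.1 ++ s.2.1.toList else s.1

-- ===== PORT B =====
-- starts = [i for i in range(n) if i == 0 or notes[i] != notes[i - 1]]; every index Source B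
-- uses is in range, so List.getD with default "" is exact here.
def pvStarts (notes : List String) : List Nat :=
  (List.range notes.length).filter (fun i => i == 0 || !(notes.getD i "" == notes.getD (i - 1) ""))

-- return [notes[a] for (a, b) in zip(starts, starts[1:] + [n]) if b - a >= min_repeats]
def filter_notes_alt (notes : List String) (min_repeats : Int) : List String :=
  ((pvStarts notes).zip ((pvStarts notes).tail ++ [notes.length])).filterMap
    (fun p => if ((p.2 : Int) - (p.1 : Int)) ≥ min_repeats then some (notes.getD p.1 "") else none)

-- ===== PRECONDITION & SPEC =====
-- Pre_ excludes min_repeats ≤ 0, where A appends the initial current_note None (not a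
-- string) to its result, which is not a value of the declared list[str] type.
def Pre_filter_notes (notes : List String) (min_repeats : Int) : Prop := 1 ≤ min_repeats
instance (notes : List String) (min_repeats : Int) : Decidable (Pre_filter_notes notes min_repeats) := by unfold Pre_filter_notes; infer_instance

def pvWitness_filter_notes : List String × Int := (["a", "a", "b"], 2)

def Spec_filter_notes (notes : List String) (min_repeats : Int) (out : List String) : Prop := out = filter_notes_alt notes min_repeats
instance (notes : List String) (min_repeats : Int) (out : List String) : Decidable (Spec_filter_notes notes min_repeats out) := by unfold Spec_filter_notes; infer_instance

-- ===== CLAIM (what is proved, stated in full; the proofs are below) =====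
def Claim_equal_filter_notes : Prop := ∀ (notes : List String) (min_repeats : Int), Dom_filter_notes notes min_repeats → Pre_filter_notes notes min_repeats → Spec_filter_notes notes min_repeats (filter_notes notes min_repeats)

-- ===== LEMMAS AND PROOFS =====

-- run-start indices of l, given the element just before l is prev
def pvB (prev : String) (l : List String) : List Nat :=
  (List.range l.length).filter (fun j => !(l.getD j "" == (prev :: l).getD j ""))

theorem pvStarts_cons (x : String) (xs : List String) :
    pvStarts (x :: xs) = 0 :: (pvB x xs).map (· + 1) := by
  unfold pvStarts pvB
  rw [List.length_cons, List.range_succ_eq_map, List.filter_cons]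
  simp only [beq_self_eq_true, Bool.true_or, if_pos, List.filter_map]
  congr 1

theorem pvB_cons (prev y : String) (l : List String) :
    pvB prev (y :: l) = (if y == prev then [] else [0]) ++ (pvB y l).map (· + 1) := by
  unfold pvB
  rw [List.length_cons, List.range_succ_eq_map, List.filter_cons]
  simp only [List.filter_map]
  by_cases h : (y == prev)
  · simp [h]; rfl
  · simp [h]; rfl

theorem pvB_run (x : String) (t d : List String) (ht : ∀ y ∈ t, y = x) :
    pvB x (t ++ d) = (pvB x d).map (· + t.length) := by
  induction t with
  | nil => simp
  | cons y t ih =>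
      have hy : y = x := ht y (by simp)
      subst hy
      rw [List.cons_append, pvB_cons]
      simp only [beq_self_eq_true, if_pos, List.nil_append]
      rw [ih (fun z hz => ht z (by simp [hz]))]
      rw [List.map_map]
      apply List.map_congr_left
      intro a _
      simp only [Function.comp, List.length_cons]
      omega

theorem pvB_eq_starts (x : String) (d : List String)
    (hd : ∀ y l, d = y :: l → (y == x) = false) :
    pvB x d = pvStarts d := by
  cases d with
  | nil => rfl
  | cons y l =>
      rw [pvB_cons, pvStarts_cons, hd y l rfl]
      rfl

theorem pvDropHead {α : Type} (p : α → Bool) (l : List α) :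
    ∀ y r, l.dropWhile p = y :: r → p y = false := by
  induction l with
  | nil => intro y r h; simp [List.dropWhile] at h
  | cons a l ih =>
      intro y r h
      rw [List.dropWhile_cons] at h
      by_cases ha : p a = true
      · rw [if_pos ha] at h; exact ih y r h
      · rw [if_neg ha] at h
        cases h
        simpa using ha

theorem pvShift2 (b : Nat) (r : List Nat) (k c : Nat) (m : Int) (notes d : List String)
    (hget : ∀ a : Nat, notes.getD (a + k) "" = d.getD a "") :
    (((b + k) :: r.map (fun a => a + k)).zip (r.map (fun a => a + k) ++ [c + k])).filterMap
        (fun p => if ((p.2 : Int) - (p.1 : Int)) ≥ m then some (notes.getD p.1 "") else none)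
      = ((b :: r).zip (r ++ [c])).filterMap
        (fun p => if ((p.2 : Int) - (p.1 : Int)) ≥ m then some (d.getD p.1 "") else none) := by
  have e1 : (b + k) :: r.map (fun a => a + k) = (b :: r).map (fun a => a + k) := by simp
  have e2 : r.map (fun a => a + k) ++ [c + k] = (r ++ [c]).map (fun a => a + k) := by simp
  rw [e1, e2, List.zip_map, List.filterMap_map]
  apply List.filterMap_congr
  intro p _
  simp only [Function.comp, Prod.map]
  have hc : (((p.2 + k : Nat) : Int) - ((p.1 + k : Nat) : Int) ≥ m) ↔ (((p.2 : Nat) : Int) - ((p.1 : Nat) : Int) ≥ m) := by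
    push_cast; omega
  rw [if_congr hc rfl rfl, hget p.1]

theorem pvAlt_rec (x : String) (xs : List String) (m : Int) :
    filter_notes_alt (x :: xs) m =
      (if (((xs.takeWhile (fun y => y == x)).length : Int) + 1) ≥ m then [x] else [])
        ++ filter_notes_alt (xs.dropWhile (fun y => y == x)) m := by
  set t := xs.takeWhile (fun y => y == x) with hts
  set d := xs.dropWhile (fun y => y == x) with hds
  have hxs : t ++ d = xs := List.takeWhile_append_dropWhile
  have ht : ∀ y ∈ t, y = x := by
    intro y hy
    rw [hts] at hy
    exact eq_of_beq (List.mem_takeWhile_imp (p := fun z => z == x) hy)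
  have hd : ∀ y l, d = y :: l → (y == x) = false := by
    intro y l h
    exact pvDropHead _ xs y l (hds ▸ h)
  have hstarts : pvStarts (x :: xs) = 0 :: (pvStarts d).map (fun a => a + (t.length + 1)) := by
    rw [pvStarts_cons, ← hxs, pvB_run x t d ht, pvB_eq_starts x d hd, List.map_map]
    congr 1
  have hlen : (x :: xs).length = d.length + (t.length + 1) := by
    have h := congrArg List.length hxs
    simp only [List.length_append] at h
    simp only [List.length_cons]
    omega
  have hget : ∀ a : Nat, (x :: xs).getD (a + (t.length + 1)) "" = d.getD a "" := by
    intro a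
    have hsp : (x :: xs) = (x :: t) ++ d := by rw [List.cons_append, hxs]
    rw [hsp, List.getD_append_right]
    · congr 1
      simp only [List.length_cons]
      omega
    · simp only [List.length_cons]
      omega
  have hrfl : filter_notes_alt (x :: xs) m =
      ((pvStarts (x :: xs)).zip ((pvStarts (x :: xs)).tail ++ [(x :: xs).length])).filterMap
        (fun p => if ((p.2 : Int) - (p.1 : Int)) ≥ m then some ((x :: xs).getD p.1 "") else none) := rfl
  have hdrfl : filter_notes_alt d m =
      ((pvStarts d).zip ((pvStarts d).tail ++ [d.length])).filterMap
        (fun p => if ((p.2 : Int) - (p.1 : Int)) ≥ m then some (d.getD p.1 "") else none) := rfl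
  rw [hrfl, hstarts, hlen]
  cases hdc : d with
  | nil =>
      have hx0 : pvStarts ([] : List String) = [] := rfl
      rw [hx0]
      simp only [List.map_nil, List.tail_cons, List.nil_append, List.length_nil, Nat.zero_add,
        List.zip_cons_cons, List.zip_nil_right, List.filterMap_cons, List.filterMap_nil]
      rw [show filter_notes_alt [] m = [] from rfl, List.append_nil]
      by_cases hm : ((t.length : Int) + 1) ≥ m
      · have h1 : (((t.length + 1 : Nat) : Int) - ((0 : Nat) : Int) ≥ m) := by push_cast; omega
        rw [if_pos h1, if_pos hm]
        rfl
      · have h1 : ¬ (((t.length + 1 : Nat) : Int) - ((0 : Nat) : Int) ≥ m) := by push_cast; omega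
        rw [if_neg h1, if_neg hm]
  | cons y l =>
      have hx0 : pvStarts (y :: l) = 0 :: (pvB y l).map (· + 1) := pvStarts_cons y l
      have hdrfl2 : filter_notes_alt (y :: l) m =
          (((0 : Nat) :: (pvB y l).map (· + 1)).zip (((pvB y l).map (· + 1)) ++ [(y :: l).length])).filterMap
            (fun p : Nat × Nat => if ((p.2 : Int) - (p.1 : Int)) ≥ m then some ((y :: l).getD p.1 "") else none) := by
        rw [hdc] at hdrfl
        rw [hdrfl, hx0, List.tail_cons]
      rw [hx0, hdrfl2]
      rw [hdc] at hget
      simp only [List.map_cons, List.tail_cons, List.cons_append, List.zip_cons_cons]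
      by_cases hm : ((t.length : Int) + 1) ≥ m
      · have h1 : (((0 + (t.length + 1) : Nat) : Int) - ((0 : Nat) : Int) ≥ m) := by push_cast; omega
        rw [List.filterMap_cons_some (by rw [if_pos h1]), if_pos hm]
        rw [pvShift2 0 ((pvB y l).map (· + 1)) (t.length + 1) (y :: l).length m (x :: xs) (y :: l) hget]
        rfl
      · have h1 : ¬ (((0 + (t.length + 1) : Nat) : Int) - ((0 : Nat) : Int) ≥ m) := by push_cast; omega
        rw [List.filterMap_cons_none (by rw [if_neg h1]), if_neg hm]
        rw [pvShift2 0 ((pvB y l).map (· + 1)) (t.length + 1) (y :: l).length m (x :: xs) (y :: l) hget]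
        rfl

def pvFinishA (m : Int) (s : List String × Option String × Int) : List String :=
  if s.2.2 ≥ m then s.1 ++ s.2.1.toList else s.1

theorem pvKey (m : Int) (xs : List String) : ∀ (acc : List String) (c : String) (k : Int), 1 ≤ k →
    pvFinishA m (xs.foldl (pvStepA m) (acc, some c, k)) =
      acc ++ (if (k + ((xs.takeWhile (fun y => y == c)).length : Int)) ≥ m then [c] else [])
        ++ filter_notes_alt (xs.dropWhile (fun y => y == c)) m := by
  induction xs with
  | nil =>
      intro acc c k hk
      simp only [List.foldl_nil, pvFinishA, List.takeWhile_nil, List.dropWhile_nil,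
        List.length_nil, Int.natCast_zero, add_zero, Option.toList_some]
      rw [show filter_notes_alt [] m = [] from rfl, List.append_nil]
      split <;> simp
  | cons x xs ih =>
      intro acc c k hk
      by_cases h : x = c
      · subst h
        have hx : (some x == some x) = true := by simp
        rw [List.foldl_cons]
        simp only [pvStepA, hx, if_true]
        rw [ih acc x (k + 1) (by omega)]
        have ht : (x :: xs).takeWhile (fun y => y == x) = x :: xs.takeWhile (fun y => y == x) := by
          simp
        have hd : (x :: xs).dropWhile (fun y => y == x) = xs.dropWhile (fun y => y == x) := by
          simp
        rw [ht, hd, List.length_cons]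
        congr 2
        apply if_congr _ rfl rfl
        push_cast
        omega
      · have hx : (some x == some c) = false := by simp [h]
        rw [List.foldl_cons]
        simp only [pvStepA, hx, Bool.false_eq_true, if_false, Option.toList_some]
        rw [ih _ x 1 (by omega)]
        have ht : (x :: xs).takeWhile (fun y => y == c) = [] := by
          simp [h]
        have hd : (x :: xs).dropWhile (fun y => y == c) = x :: xs := by
          simp [h]
        rw [ht, hd, pvAlt_rec x xs m]
        have hpush : (if (k : Int) ≥ m then acc ++ [c] else acc) = acc ++ (if (k : Int) ≥ m then [c] else []) := by
          split <;> simp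
        rw [hpush]
        have hcond : ((1 + ((xs.takeWhile (fun y => y == x)).length : Int)) ≥ m) ↔ ((((xs.takeWhile (fun y => y == x)).length : Int) + 1) ≥ m) := by omega
        rw [if_congr hcond rfl rfl]
        have hk0 : ((k + (([] : List String).length : Int)) ≥ m) ↔ ((k : Int) ≥ m) := by simp
        rw [if_congr hk0 rfl rfl]
        simp [List.append_assoc]

-- ===== VERDICT (by name: the statement is the Claim_ definition above) =====
theorem filter_notes_spec : Claim_equal_filter_notes := by
  intro notes m _ _
  unfold Spec_filter_notes
  cases notes with
  | nil =>
      simp [filter_notes]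
      rfl
  | cons n rest =>
      have h0 : filter_notes (n :: rest) m = pvFinishA m ((n :: rest).foldl (pvStepA m) ([], none, 0)) := by
        simp [filter_notes, pvFinishA]
      rw [h0, List.foldl_cons]
      have hstep : pvStepA m ([], none, 0) n = ([], some n, 1) := by
        simp [pvStepA]
      rw [hstep, pvKey m rest [] n 1 (by omega)]
      rw [pvAlt_rec n rest m]
      have hcond : ((1 + ((rest.takeWhile (fun y => y == n)).length : Int)) ≥ m) ↔ ((((rest.takeWhile (fun y => y == n)).length : Int) + 1) ≥ m) := by omega
      rw [if_congr hcond rfl rfl]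
      simp
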